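-- pv_equiv track=rewrite | github.com/mjf789/spam_news | src/data_loader.py | parse_human_coding
-- ===== SOURCE A (Python) =====
-- from typing import Dict, List, Optional, Union
--
-- def parse_human_coding(coding_data: Dict) -> Dict[str, Dict[str, int]]:
--     """Parse human coding data into standardized format"""
--     parsed = {
--         'underrepresentation': {},
--         'overrepresentation': {},
--         'obstacles': {},
--         'successes': {}
--     }
--
--     for frame_type, demographics in coding_data.items():
--         if frame_type in parsed and isinstance(demographics, dict):
--             parsed[frame_type] = demographics
--
--     return parsed
-- ===== SOURCE B (Python) =====
-- def parse_human_coding(coding_data):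
--     """Parse human coding data into standardized format (schema-driven build)."""
--     schema = ('underrepresentation', 'overrepresentation', 'obstacles', 'successes')
--     result = {}
--     for key in schema:
--         value = coding_data.get(key)
--         result[key] = value if isinstance(value, dict) else {}
--     return result
-- ===== Notes on version B (the rewrite author's own statement) =====
-- stated objective: simpler
-- what changed: B builds the result by iterating over the fixed four-key schema and looking each key up in the input (output/schema-driven), instead of A's pre-initialised template mutated by a filtering pass over coding_data.items() (input-driven).
import Mathlib
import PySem

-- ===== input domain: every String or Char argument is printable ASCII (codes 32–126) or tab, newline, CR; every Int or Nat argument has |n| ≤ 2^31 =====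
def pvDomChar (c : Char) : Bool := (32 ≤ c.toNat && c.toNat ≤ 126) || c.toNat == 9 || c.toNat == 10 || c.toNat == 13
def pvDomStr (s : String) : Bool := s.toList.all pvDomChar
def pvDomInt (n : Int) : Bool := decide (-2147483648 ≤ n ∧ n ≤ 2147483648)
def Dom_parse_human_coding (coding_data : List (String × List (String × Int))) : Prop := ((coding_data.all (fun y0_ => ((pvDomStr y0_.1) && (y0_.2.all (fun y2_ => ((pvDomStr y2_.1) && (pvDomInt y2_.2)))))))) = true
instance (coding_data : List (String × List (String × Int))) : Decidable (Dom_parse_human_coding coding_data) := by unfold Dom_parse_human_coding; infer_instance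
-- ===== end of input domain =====

-- One honest line: B builds the result schema-first (map over the four fixed keys with a
-- lookup into the input) instead of A's template mutated by a filtering pass over the input.

-- ===== PORT A =====
def parse_human_coding (coding_data : List (String × List (String × Int))) : List (String × List (String × Int)) :=
  -- parsed = {'underrepresentation': {}, ...}
  let parsed : PySem.Dict String (List (String × Int)) :=
    PySem.Dict.ofList [("underrepresentation", []), ("overrepresentation", []), ("obstacles", []), ("successes", [])]
  -- for frame_type, demographics in coding_data.items(): if frame_type in parsed and isinstance(demographics, dict): ...
  -- (the isinstance test is always true on this type: every value IS a dict)
  let parsed := coding_data.foldl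
    (fun p kv => if p.contains kv.1 then p.insert kv.1 kv.2 else p) parsed
  parsed.items

-- ===== PORT B =====
def parse_human_coding_alt (coding_data : List (String × List (String × Int))) : List (String × List (String × Int)) :=
  -- {key: (v if isinstance(v := coding_data.get(key), dict) else {}) for key in schema}
  -- coding_data.get(key): first match in the association list; isinstance is always true on this type
  ["underrepresentation", "overrepresentation", "obstacles", "successes"].map
    (fun k => (k, ((PySem.Dict.mk coding_data).get? k).getD []))

-- ===== PRECONDITION & SPEC =====
-- Pre_ excludes association lists with duplicate keys: such a list does not represent any
-- Python dict (dict keys are unique), so A's behaviour there would be an artefact of the encoding.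
def Pre_parse_human_coding (coding_data : List (String × List (String × Int))) : Prop :=
  (coding_data.map Prod.fst).Nodup
instance (coding_data : List (String × List (String × Int))) : Decidable (Pre_parse_human_coding coding_data) := by unfold Pre_parse_human_coding; infer_instance

def pvWitness_parse_human_coding : (List (String × List (String × Int))) :=
  [("obstacles", [("a", 1)]), ("junk", [])]

def Spec_parse_human_coding (coding_data : List (String × List (String × Int))) (out : List (String × List (String × Int))) : Prop := out = parse_human_coding_alt coding_data
instance (coding_data : List (String × List (String × Int))) (out : List (String × List (String × Int))) : Decidable (Spec_parse_human_coding coding_data out) := by unfold Spec_parse_human_coding; infer_instance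

-- ===== CLAIM (what is proved, stated in full; the proofs are below) =====
def Claim_equal_parse_human_coding : Prop := ∀ (coding_data : List (String × List (String × Int))), Dom_parse_human_coding coding_data → Pre_parse_human_coding coding_data → Spec_parse_human_coding coding_data (parse_human_coding coding_data)

-- ===== LEMMAS AND PROOFS =====

-- A's loop, started from any dict p with distinct keys, over an association list with distinct
-- keys, replaces each value of p by the value its key has in the list (if any), keeping p's shape.
theorem pv_fold_items (xs : List (String × List (String × Int)))
    (p : PySem.Dict String (List (String × Int)))
    (hxs : (xs.map Prod.fst).Nodup) (hp : p.keys.Nodup) :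
    (xs.foldl (fun p kv => if p.contains kv.1 then p.insert kv.1 kv.2 else p) p).items
      = p.items.map (fun kv => (kv.1, ((PySem.Dict.mk xs).get? kv.1).getD kv.2)) := by
  induction xs generalizing p with
  | nil =>
      simp [PySem.Dict.get?]
  | cons hd tl ih =>
      obtain ⟨k, v⟩ := hd
      simp only [List.map_cons, List.nodup_cons] at hxs
      obtain ⟨hk, htl⟩ := hxs
      simp only [List.foldl_cons]
      by_cases hc : p.contains k = true
      · rw [show (if p.contains (k, v).1 then p.insert (k, v).1 (k, v).2 else p) = p.insert k v by
            simp [hc]]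
        rw [ih (p.insert k v) htl (PySem.Dict.nodup_keys_insert _ _ _ hp)]
        rw [PySem.Dict.items_insert_of_contains _ _ hc, List.map_map]
        apply List.map_congr_left
        intro q _
        by_cases hq : q.1 = k
        · have hnone : (PySem.Dict.mk tl).get? k = none := by
            rw [PySem.Dict.get?_eq_none_iff_not_mem_keys]
            simpa [PySem.Dict.keys] using hk
          simp [Function.comp, hq, PySem.Dict.get?_mk_cons, hnone]
        · simp [Function.comp, PySem.Dict.get?_mk_cons, Ne.symm hq,
            show (q.1 == k) = false by simp [hq]]
      · rw [show (if p.contains (k, v).1 then p.insert (k, v).1 (k, v).2 else p) = p by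
            simp [hc]]
        rw [ih p htl hp]
        apply List.map_congr_left
        intro q hq
        have hqk : q.1 ≠ k := by
          intro h
          apply hc
          rw [PySem.Dict.contains_iff_mem_keys] at *
          exact h ▸ PySem.Dict.mem_keys_of_mem_items _ hq
        simp [PySem.Dict.get?_mk_cons, show (k == q.1) = false by simp [Ne.symm hqk]]

-- ===== VERDICT (by name: the statement is the Claim_ definition above) =====
theorem parse_human_coding_spec : Claim_equal_parse_human_coding := by
  intro cd _ hpre
  show parse_human_coding cd = parse_human_coding_alt cd
  unfold parse_human_coding parse_human_coding_alt
  rw [pv_fold_items cd _ hpre (by decide)]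
  rfl
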